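-- pv_equiv track=rewrite | github.com/orjanhsy/advent | advent6_1.py | record_overview
-- ===== SOURCE A (Python) =====
-- def record_overview(lines):
--     races = []
--     for line in lines:
--         numbers = []
--         number = ""
--         c = 0
--         while c < len(line):
--             while line[c].isdigit():
--                 number += line[c]
--                 c += 1
--                 if c == len(line):
--                     break
--             if len(number) > 0:
--                 numbers.append(int(number))
--             number = ""
--             c += 1
--         races.append(numbers)
--     records = dict()
--     for i in range(len(races[0])):
--         records[races[0][i]] = races[1][i]
--     return records
-- ===== SOURCE B (Python) =====
-- def record_overview(lines):
--     races = [
--         [int(tok) for tok in "".join(ch if ch.isdigit() else " " for ch in line).split()]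
--         for line in lines
--     ]
--     records = {}
--     for i in range(len(races[0])):
--         records[races[0][i]] = races[1][i]
--     return records
-- ===== Notes on version B (the rewrite author's own statement) =====
-- stated objective: idiomatic
-- what changed: A's manual index-based nested while loops (with a break at end-of-line) are replaced by mapping every non-digit character to a space and tokenizing with str.split(); the final dict construction keeps the explicit indexed loop so it raises exactly where A does.
import Mathlib
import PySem

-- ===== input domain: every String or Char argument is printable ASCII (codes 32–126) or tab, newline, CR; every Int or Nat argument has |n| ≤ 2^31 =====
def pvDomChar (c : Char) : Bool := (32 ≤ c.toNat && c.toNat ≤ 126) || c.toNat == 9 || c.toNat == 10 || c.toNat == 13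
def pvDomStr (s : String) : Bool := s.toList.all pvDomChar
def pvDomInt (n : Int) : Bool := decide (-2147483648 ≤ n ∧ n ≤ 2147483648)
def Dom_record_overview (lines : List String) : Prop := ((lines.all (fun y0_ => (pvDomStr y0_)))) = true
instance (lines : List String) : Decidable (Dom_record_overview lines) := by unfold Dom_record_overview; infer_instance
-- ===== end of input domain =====

-- B replaces A's index-juggling nested while loops with an idiomatic map-non-digits-to-spaces + split() tokenization; the final dict loop is kept indexed so it raises exactly where A does.

-- int(number) for a token (both Pythons call int() on the extracted digit runs; the
-- getD 0 default is never reached on digit-run tokens).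
def pyInt (cs : List Char) : Int := (PySem.Int.ofChars? cs).getD 0

-- ===== PORT A =====
-- inner `while line[c].isdigit(): number += line[c]; c += 1; if c == len(line): break`,
-- with the remaining suffix of the line standing for the index c.
def innerA (cs : List Char) (num : List Char) : List Char × List Char :=
  match cs with
  | [] => (num, [])
  | c :: rest => if PySem.Chars.isdigit c then innerA rest (num ++ [c]) else (num, c :: rest)

-- termination of outerA (cited in its decreasing_by)
theorem innerA_snd_len (cs : List Char) (num : List Char) :
    (innerA cs num).2.length ≤ cs.length := by
  induction cs generalizing num with
  | nil => simp [innerA]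
  | cons c rest ih =>
    simp only [innerA]
    split
    · exact le_trans (ih _) (Nat.le_succ _)
    · simp

-- outer `while c < len(line)` loop: extract one number (if any), skip one character, repeat.
def outerA (cs : List Char) (nums : List Int) : List Int :=
  match cs with
  | [] => nums
  | c :: rest =>
    let p := innerA (c :: rest) []
    outerA p.2.tail (if p.1.length > 0 then nums ++ [pyInt p.1] else nums)
termination_by cs.length
decreasing_by
  have h := innerA_snd_len (c :: rest) []
  simp only [List.length_tail]
  simp only [List.length_cons] at *
  omega

def record_overview (lines : List String) : List (Int × Int) :=
  let races := lines.foldl (fun rs line => rs ++ [outerA line.toList []]) []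
  let r0 := races.getD 0 []
  let r1 := races.getD 1 []
  ((List.range r0.length).foldl
    (fun (d : PySem.Dict Int Int) i => d.insert (r0.getD i 0) (r1.getD i 0))
    PySem.Dict.empty).items

-- ===== PORT B =====
-- `ch if ch.isdigit() else " "`
def subSpace (c : Char) : Char := if PySem.Chars.isdigit c then c else ' '

def record_overview_alt (lines : List String) : List (Int × Int) :=
  let races := lines.map
    (fun line => (PySem.Chars.split₀ (line.toList.map subSpace)).map pyInt)
  let r0 := races.getD 0 []
  let r1 := races.getD 1 []
  ((List.range r0.length).foldl
    (fun (d : PySem.Dict Int Int) i => d.insert (r0.getD i 0) (r1.getD i 0))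
    PySem.Dict.empty).items

-- ===== PRECONDITION & SPEC =====
-- number of maximal digit runs in a string (shape measure used only by Pre_)
def pvCountRuns (s : String) : Nat :=
  (s.toList.foldl
    (fun (p : Nat × Bool) c =>
      if c.isDigit then (if p.2 then p else (p.1 + 1, true)) else (p.1, false))
    (0, false)).1

-- Pre_ excludes exactly the inputs where Python A raises an IndexError: an empty list of
-- lines (races[0]), and a first line whose digit-run count exceeds what the second line
-- (or a missing second line) provides (races[1][i]).
def Pre_record_overview (lines : List String) : Prop :=
  lines ≠ [] ∧
    (pvCountRuns (lines.getD 0 "") = 0 ∨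
      (2 ≤ lines.length ∧ pvCountRuns (lines.getD 0 "") ≤ pvCountRuns (lines.getD 1 "")))
instance (lines : List String) : Decidable (Pre_record_overview lines) := by
  unfold Pre_record_overview; infer_instance

def pvWitness_record_overview : List String := ["Time:  7 15  30", "Distance: 9 40 200"]

def Spec_record_overview (lines : List String) (out : List (Int × Int)) : Prop :=
  out = record_overview_alt lines
instance (lines : List String) (out : List (Int × Int)) : Decidable (Spec_record_overview lines out) := by
  unfold Spec_record_overview; infer_instance

-- ===== CLAIM (what is proved, stated in full; the proofs are below) =====
def Claim_equal_record_overview : Prop :=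
  ∀ (lines : List String), Dom_record_overview lines → Pre_record_overview lines →
    Spec_record_overview lines (record_overview lines)

-- ===== LEMMAS AND PROOFS =====

-- the list of maximal digit runs of a character list (common specification of both scanners)
def runsSpec (cs : List Char) : List (List Char) :=
  match cs with
  | [] => []
  | c :: rest =>
    if PySem.Chars.isdigit c then
      (c :: rest.takeWhile PySem.Chars.isdigit) :: runsSpec (rest.dropWhile PySem.Chars.isdigit)
    else runsSpec rest
termination_by cs.length
decreasing_by
  · have := List.length_dropWhile_le (p := PySem.Chars.isdigit) rest
    simp only [List.length_cons]; omega
  · simp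

theorem innerA_spec (cs : List Char) (num : List Char) :
    innerA cs num = (num ++ cs.takeWhile PySem.Chars.isdigit, cs.dropWhile PySem.Chars.isdigit) := by
  induction cs generalizing num with
  | nil => simp [innerA]
  | cons c rest ih =>
    simp only [innerA, List.takeWhile_cons, List.dropWhile_cons]
    cases h : PySem.Chars.isdigit c with
    | true => simp [ih]
    | false => simp

theorem runsSpec_dropWhile_tail (cs : List Char) :
    runsSpec (cs.dropWhile PySem.Chars.isdigit) = runsSpec (cs.dropWhile PySem.Chars.isdigit).tail := by
  cases h : cs.dropWhile PySem.Chars.isdigit with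
  | nil => rfl
  | cons e d =>
    have t := List.head?_dropWhile_not PySem.Chars.isdigit cs
    rw [h] at t
    have he : PySem.Chars.isdigit e = false := by simpa using t
    simp [runsSpec, he]

theorem outerA_spec (n : Nat) (cs : List Char) (hn : cs.length ≤ n) (nums : List Int) :
    outerA cs nums = nums ++ (runsSpec cs).map pyInt := by
  induction n generalizing cs nums with
  | zero =>
    have : cs = [] := List.eq_nil_of_length_eq_zero (Nat.le_zero.mp hn)
    subst this; simp [outerA, runsSpec]
  | succ m ih =>
    cases cs with
    | nil => simp [outerA, runsSpec]
    | cons c rest =>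
      rw [outerA, innerA_spec]
      simp only [List.nil_append, List.takeWhile_cons, List.dropWhile_cons, runsSpec]
      cases h : PySem.Chars.isdigit c with
      | true =>
        simp only [List.length_cons, gt_iff_lt, if_true, Nat.zero_lt_succ]
        have hlen : ((rest.dropWhile PySem.Chars.isdigit).tail).length ≤ m := by
          have h1 := List.length_dropWhile_le (p := PySem.Chars.isdigit) rest
          have h2 := List.length_tail (l := rest.dropWhile PySem.Chars.isdigit)
          simp only [List.length_cons] at hn; omega
        rw [ih _ hlen, ← runsSpec_dropWhile_tail rest]
        simp
      | false =>
        simp only [Bool.false_eq_true, if_false, List.tail_cons, List.length_nil,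
          gt_iff_lt, Nat.lt_irrefl]
        have hlen : rest.length ≤ m := by simp only [List.length_cons] at hn; omega
        rw [ih _ hlen]

theorem isspace_of_isdigit (c : Char) (h : PySem.Chars.isdigit c = true) :
    PySem.Chars.isspace c = false := by
  simp only [PySem.Chars.isdigit, Bool.and_eq_true, decide_eq_true_eq, Char.le_def,
    UInt32.le_iff_toNat_le] at h
  have h0 : ('0').val.toNat = 48 := rfl
  have h9 : ('9').val.toNat = 57 := rfl
  rw [h0, h9] at h
  simp only [PySem.Chars.isspace, Char.toNat, Bool.or_eq_false_iff, Bool.and_eq_false_iff,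
    decide_eq_false_iff_not]
  omega

theorem go_spec (cs : List Char) (cur : List Char) (acc : List (List Char)) :
    PySem.Chars.split₀.go (cs.map subSpace) cur acc =
      acc.reverse ++
        (if cur.isEmpty then runsSpec cs
         else (cur.reverse ++ cs.takeWhile PySem.Chars.isdigit) ::
                runsSpec (cs.dropWhile PySem.Chars.isdigit)) := by
  induction cs generalizing cur acc with
  | nil =>
    cases cur with
    | nil => simp [PySem.Chars.split₀.go, runsSpec]
    | cons a l => simp [PySem.Chars.split₀.go, runsSpec]
  | cons c rest ih =>
    cases h : PySem.Chars.isdigit c with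
    | true =>
      have hns : PySem.Chars.isspace c = false := isspace_of_isdigit c h
      simp only [List.map_cons, PySem.Chars.split₀.go, subSpace, h, if_true, hns,
        Bool.false_eq_true, if_false]
      rw [ih (c :: cur) acc]
      cases cur with
      | nil => simp [runsSpec, h]
      | cons a l => simp [h]
    | false =>
      have hs : PySem.Chars.isspace ' ' = true := by decide
      simp only [List.map_cons, PySem.Chars.split₀.go, subSpace, h, Bool.false_eq_true,
        if_false, hs, if_true]
      cases cur with
      | nil =>
        simp only [List.isEmpty_nil, if_true]
        rw [ih [] acc]
        simp [runsSpec, h]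
      | cons a l =>
        simp only [List.isEmpty_cons, Bool.false_eq_true, if_false]
        rw [ih [] (((a :: l).reverse) :: acc)]
        simp [runsSpec, h]

theorem line_eq (cs : List Char) :
    outerA cs [] = (PySem.Chars.split₀ (cs.map subSpace)).map pyInt := by
  rw [PySem.Chars.split₀, go_spec, outerA_spec cs.length cs le_rfl]
  simp

theorem races_eq (lines : List String) :
    lines.foldl (fun rs line => rs ++ [outerA line.toList []]) [] =
      lines.map (fun line => (PySem.Chars.split₀ (line.toList.map subSpace)).map pyInt) := by
  rw [PySem.List.foldl_append_singleton_eq_map]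
  exact List.map_congr_left (fun l _ => line_eq l.toList)

-- ===== VERDICT (by name: the statement is the Claim_ definition above) =====
theorem record_overview_spec : Claim_equal_record_overview := by
  intro lines _ _
  unfold Spec_record_overview record_overview record_overview_alt
  rw [races_eq]
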